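-- pv_equiv track=rewrite | github.com/AI4FeedAndFood/ELPV_OCRTool | LandscapeFormat.py | get_frame_lines
-- ===== SOURCE A (Python) =====
-- def get_frame_lines(position, lines , mode="vertical", var_match=False):
--     """
--     Get the "mode" line that frame the object of position "position"
--
--     Args:
--         position (list): Accept [x,y,...] or [(x,y),(...)] ONLY
--         lines (list): output of the HoughLines function ; [[(x1,y1),(x2,y2)], ...]
--         mode (str, optional): The orientation of lines. Defaults to "vertical".
--         var_match (bool, optional): If True, select lines that the var exis cross the position. Defaults to "False".
--     """
--     (cst, var) = (0,1) if mode == "vertical"  else (1,0) # vertical means the x axis (index 0) is cst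
--     xy_position = position[0] if type(position[0])==type((0,0)) else position[:2]
--     if var_match:
--         lines = [line for line in lines if min(line[0][var], line[1][var])<=xy_position[var]<=max(line[0][var], line[1][var])]
--     shift = lambda x: x[0][cst]-xy_position[cst]
--     linf = [line for line in lines if shift(line)<=0]
--     lsup = [line for line in lines if shift(line)>=0]
--
--     first_line = min(linf, key=lambda x: -shift(x)) if len(linf) !=0 else []
--     second_line = min(lsup, key=lambda x: shift(x)) if len(lsup) !=0 else []
--
--     return first_line, second_line
-- ===== SOURCE B (Python) =====
-- def get_frame_lines(position, lines, mode="vertical", var_match=False):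
--     # Single pass: keep the best line below and above, tracking their shifts;
--     # strict improvement only, so the first line wins on ties (like min()).
--     (cst, var) = (0, 1) if mode == "vertical" else (1, 0)
--     xy_position = position[0] if type(position[0]) == type((0, 0)) else position[:2]
--     if var_match:
--         lines = [line for line in lines if min(line[0][var], line[1][var]) <= xy_position[var] <= max(line[0][var], line[1][var])]
--     best_below, below_s = [], None
--     best_above, above_s = [], None
--     for line in lines:
--         s = line[0][cst] - xy_position[cst]
--         if s <= 0 and (below_s is None or s > below_s):
--             best_below, below_s = line, s
--         if s >= 0 and (above_s is None or s < above_s):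
--             best_above, above_s = line, s
--     return best_below, best_above
-- ===== Notes on version B (the rewrite author's own statement) =====
-- stated objective: simpler
-- what changed: The two split-comprehensions and the two min(..., key=...) scans are replaced by a single loop over the lines that maintains the best below-line and best above-line together with their shift values (strict-improvement updates preserve first-on-tie).
-- outside the precondition, e.g. on get_frame_lines([5], [[(3, 9), (4, 9)]], 'horizontal', True): A returns ([], []), B returns ([], []); on get_frame_lines([], [], 'vertical', False): A raises IndexError, B raises IndexError
import Mathlib
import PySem

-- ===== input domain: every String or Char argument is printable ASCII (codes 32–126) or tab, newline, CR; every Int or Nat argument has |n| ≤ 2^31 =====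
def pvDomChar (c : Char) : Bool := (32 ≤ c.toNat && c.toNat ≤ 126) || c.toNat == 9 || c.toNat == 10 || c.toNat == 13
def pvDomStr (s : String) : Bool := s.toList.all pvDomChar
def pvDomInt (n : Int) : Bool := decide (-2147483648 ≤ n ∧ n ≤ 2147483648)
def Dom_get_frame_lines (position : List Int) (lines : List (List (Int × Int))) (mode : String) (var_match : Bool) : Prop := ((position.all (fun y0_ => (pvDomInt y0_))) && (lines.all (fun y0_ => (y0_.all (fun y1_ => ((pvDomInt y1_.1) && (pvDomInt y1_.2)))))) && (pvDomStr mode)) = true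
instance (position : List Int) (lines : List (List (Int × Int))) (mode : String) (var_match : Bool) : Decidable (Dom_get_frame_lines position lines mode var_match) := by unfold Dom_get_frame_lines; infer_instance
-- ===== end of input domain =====

-- B replaces A's two split-comprehensions + two min-scans with one loop keeping the best below/above line (simpler, one pass).


-- ===== PORT A =====
-- shared tiny helpers: tuple indexing p[i] for i ∈ {0,1}, and the var_match crossing test (same expression in Source A and Source B)
def pvPairGet (p : Int × Int) (i : Nat) : Int := if i = 0 then p.1 else p.2

def pvCross (var : Nat) (xv : Int) (line : List (Int × Int)) : Bool :=
  let a := pvPairGet ((PySem.List.pyGet? line 0).getD (0, 0)) var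
  let b := pvPairGet ((PySem.List.pyGet? line 1).getD (0, 0)) var
  decide (min a b ≤ xv ∧ xv ≤ max a b)

-- literal port of A (the `.getD` defaults are never reached under Pre_; the tuple branch of
-- `position[0] if type(position[0])==type((0,0))` is dead because position : List Int)
def get_frame_lines (position : List Int) (lines : List (List (Int × Int))) (mode : String) (var_match : Bool) : (List (Int × Int)) × (List (Int × Int)) :=
  let cst : Nat := if mode = "vertical" then 0 else 1
  let var : Nat := if mode = "vertical" then 1 else 0
  let xy_position : List Int := PySem.List.slice position (some 0) (some 2)
  let xv : Int := (PySem.List.pyGet? xy_position (var : Int)).getD 0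
  let xc : Int := (PySem.List.pyGet? xy_position (cst : Int)).getD 0
  let lines1 := if var_match then lines.filter (pvCross var xv) else lines
  let shift : List (Int × Int) → Int := fun x => pvPairGet ((PySem.List.pyGet? x 0).getD (0, 0)) cst - xc
  let linf := lines1.filter (fun line => decide (shift line ≤ 0))
  let lsup := lines1.filter (fun line => decide (0 ≤ shift line))
  let first_line := if linf.length ≠ 0 then (PySem.List.min? linf (fun x => -shift x)).getD [] else []
  let second_line := if lsup.length ≠ 0 then (PySem.List.min? lsup (fun x => shift x)).getD [] else []
  (first_line, second_line)

-- ===== PORT B =====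
-- one update step of Source B's loop for the below side: `if s <= 0 and (below_s is None or s > below_s)`
def pvBelowStep (st : (List (Int × Int)) × Option Int) (line : List (Int × Int)) (s : Int) : (List (Int × Int)) × Option Int :=
  if (decide (s ≤ 0) && (match st.2 with | none => true | some bs => decide (bs < s))) then (line, some s) else st

-- one update step of Source B's loop for the above side: `if s >= 0 and (above_s is None or s < above_s)`
def pvAboveStep (st : (List (Int × Int)) × Option Int) (line : List (Int × Int)) (s : Int) : (List (Int × Int)) × Option Int :=
  if (decide (0 ≤ s) && (match st.2 with | none => true | some as_ => decide (s < as_))) then (line, some s) else st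

def get_frame_lines_alt (position : List Int) (lines : List (List (Int × Int))) (mode : String) (var_match : Bool) : (List (Int × Int)) × (List (Int × Int)) :=
  let cst : Nat := if mode = "vertical" then 0 else 1
  let var : Nat := if mode = "vertical" then 1 else 0
  let xy_position : List Int := PySem.List.slice position (some 0) (some 2)
  let xv : Int := (PySem.List.pyGet? xy_position (var : Int)).getD 0
  let xc : Int := (PySem.List.pyGet? xy_position (cst : Int)).getD 0
  let lines1 := if var_match then lines.filter (pvCross var xv) else lines
  let r := lines1.foldl
    (fun st line =>
      let s : Int := pvPairGet ((PySem.List.pyGet? line 0).getD (0, 0)) cst - xc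
      (pvBelowStep st.1 line s, pvAboveStep st.2 line s))
    (([], none), ([], none))
  (r.1.1, r.2.1)

-- ===== PRECONDITION & SPEC =====
-- Pre_ excludes exactly the inputs where A raises IndexError (empty position; a position missing the
-- coordinate that is read; an empty line; a one-point line under var_match), except one degenerate
-- corner it also excludes although A returns ([],[]) there: a 1-coordinate position with non-vertical
-- mode and var_match whose filter discards every line, so position[cst] is never read (see cites).
def Pre_get_frame_lines (position : List Int) (lines : List (List (Int × Int))) (mode : String) (var_match : Bool) : Prop :=
  1 ≤ position.length ∧
  (∀ l ∈ lines, 1 ≤ l.length ∧ (var_match = true → 2 ≤ l.length)) ∧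
  (lines ≠ [] → ((mode = "vertical" ∧ var_match = false) ∨ 2 ≤ position.length))
instance (position : List Int) (lines : List (List (Int × Int))) (mode : String) (var_match : Bool) : Decidable (Pre_get_frame_lines position lines mode var_match) := by unfold Pre_get_frame_lines; infer_instance

def pvWitness_get_frame_lines : List Int × (List (List (Int × Int))) × String × Bool :=
  ([1, 2], [[(0, 0), (0, 5)], [(3, 0), (3, 5)]], "vertical", false)

def Spec_get_frame_lines (position : List Int) (lines : List (List (Int × Int))) (mode : String) (var_match : Bool) (out : (List (Int × Int)) × (List (Int × Int))) : Prop := out = get_frame_lines_alt position lines mode var_match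
instance (position : List Int) (lines : List (List (Int × Int))) (mode : String) (var_match : Bool) (out : (List (Int × Int)) × (List (Int × Int))) : Decidable (Spec_get_frame_lines position lines mode var_match out) := by unfold Spec_get_frame_lines; infer_instance

-- ===== CLAIM (what is proved, stated in full; the proofs are below) =====
def Claim_equal_get_frame_lines : Prop := ∀ (position : List Int) (lines : List (List (Int × Int))) (mode : String) (var_match : Bool), Dom_get_frame_lines position lines mode var_match → Pre_get_frame_lines position lines mode var_match → Spec_get_frame_lines position lines mode var_match (get_frame_lines position lines mode var_match)

-- ===== LEMMAS AND PROOFS =====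

-- A-side "best" as an option-valued fold: the first minimal element of the filtered list
def pvGB (shift : List (Int × Int) → Int) (acc : Option (List (Int × Int))) (x : List (Int × Int)) : Option (List (Int × Int)) :=
  if shift x ≤ 0 then
    (match acc with
     | none => some x
     | some m => if -shift x < -shift m then some x else some m)
  else acc

def pvGA (shift : List (Int × Int) → Int) (acc : Option (List (Int × Int))) (x : List (Int × Int)) : Option (List (Int × Int)) :=
  if 0 ≤ shift x then
    (match acc with
     | none => some x
     | some m => if shift x < shift m then some x else some m)
  else acc

-- Source B's (best_line, best_shift) pair as a representation of the option accumulator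
def pvRep (shift : List (Int × Int) → Int) : Option (List (Int × Int)) → (List (Int × Int)) × Option Int
  | none => ([], none)
  | some m => (m, some (shift m))

theorem pv_foldl_ext {α β : Type} (f g : β → α → β) (h : ∀ s x, f s x = g s x) :
    ∀ (L : List α) (s : β), L.foldl f s = L.foldl g s := by
  intro L
  induction L with
  | nil => intro s; rfl
  | cons x t ih => intro s; simp only [List.foldl_cons, h s x, ih]

theorem pv_foldl_guard {α β : Type} (p : α → Bool) (f : β → α → β) :
    ∀ (L : List α) (s : β),
      (L.filter p).foldl f s = L.foldl (fun s x => if p x then f s x else s) s := by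
  intro L
  induction L with
  | nil => intro s; rfl
  | cons x t ih =>
    intro s
    by_cases h : p x = true <;> simp [h, ih]

theorem pv_foldl_pair2 (shift : List (Int × Int) → Int) :
    ∀ (L : List (List (Int × Int))) (b c : (List (Int × Int)) × Option Int),
      L.foldl (fun st line => (pvBelowStep st.1 line (shift line), pvAboveStep st.2 line (shift line))) (b, c)
        = (L.foldl (fun st x => pvBelowStep st x (shift x)) b, L.foldl (fun st x => pvAboveStep st x (shift x)) c) := by
  intro L
  induction L with
  | nil => intro b c; rfl
  | cons x t ih => intro b c; simpa using ih (pvBelowStep b x (shift x)) (pvAboveStep c x (shift x))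

theorem pv_stepB_rep (shift : List (Int × Int) → Int) (acc : Option (List (Int × Int))) (x : List (Int × Int)) :
    pvBelowStep (pvRep shift acc) x (shift x) = pvRep shift (pvGB shift acc x) := by
  cases acc with
  | none =>
    simp only [pvRep, pvBelowStep, pvGB]
    split_ifs <;> simp_all
  | some m =>
    simp only [pvRep, pvBelowStep, pvGB]
    split_ifs <;> simp_all <;> omega

theorem pv_stepA_rep (shift : List (Int × Int) → Int) (acc : Option (List (Int × Int))) (x : List (Int × Int)) :
    pvAboveStep (pvRep shift acc) x (shift x) = pvRep shift (pvGA shift acc x) := by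
  cases acc with
  | none =>
    simp only [pvRep, pvAboveStep, pvGA]
    split_ifs <;> simp_all
  | some m =>
    simp only [pvRep, pvAboveStep, pvGA]
    split_ifs <;> simp_all

theorem pv_foldl_stepB (shift : List (Int × Int) → Int) :
    ∀ (L : List (List (Int × Int))) (acc : Option (List (Int × Int))),
      L.foldl (fun st x => pvBelowStep st x (shift x)) (pvRep shift acc)
        = pvRep shift (L.foldl (pvGB shift) acc) := by
  intro L
  induction L with
  | nil => intro acc; rfl
  | cons x t ih =>
    intro acc
    simp only [List.foldl_cons, pv_stepB_rep shift acc x]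
    exact ih (pvGB shift acc x)

theorem pv_foldl_stepA (shift : List (Int × Int) → Int) :
    ∀ (L : List (List (Int × Int))) (acc : Option (List (Int × Int))),
      L.foldl (fun st x => pvAboveStep st x (shift x)) (pvRep shift acc)
        = pvRep shift (L.foldl (pvGA shift) acc) := by
  intro L
  induction L with
  | nil => intro acc; rfl
  | cons x t ih =>
    intro acc
    simp only [List.foldl_cons, pv_stepA_rep shift acc x]
    exact ih (pvGA shift acc x)

theorem pv_min_linf (shift : List (Int × Int) → Int) (L : List (List (Int × Int))) :
    PySem.List.min? (L.filter (fun line => decide (shift line ≤ 0))) (fun x => -shift x)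
      = L.foldl (pvGB shift) none := by
  show (L.filter (fun line => decide (shift line ≤ 0))).foldl _ none = _
  rw [pv_foldl_guard]
  apply pv_foldl_ext
  intro s x
  cases s <;> by_cases h : shift x ≤ 0 <;> simp [pvGB, h]

theorem pv_min_lsup (shift : List (Int × Int) → Int) (L : List (List (Int × Int))) :
    PySem.List.min? (L.filter (fun line => decide (0 ≤ shift line))) (fun x => shift x)
      = L.foldl (pvGA shift) none := by
  show (L.filter (fun line => decide (0 ≤ shift line))).foldl _ none = _
  rw [pv_foldl_guard]
  apply pv_foldl_ext
  intro s x
  cases s <;> by_cases h : 0 ≤ shift x <;> simp [pvGA, h]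

theorem pv_belowA (shift : List (Int × Int) → Int) (L : List (List (Int × Int))) :
    (if (L.filter (fun line => decide (shift line ≤ 0))).length ≠ 0 then
        (PySem.List.min? (L.filter (fun line => decide (shift line ≤ 0))) (fun x => -shift x)).getD []
      else [])
      = (pvRep shift (L.foldl (pvGB shift) none)).1 := by
  cases h : L.foldl (pvGB shift) none with
  | none =>
    have he : L.filter (fun line => decide (shift line ≤ 0)) = [] :=
      (PySem.List.min?_eq_none_iff _ _).mp (by rw [pv_min_linf shift L, h])
    simp [he, pvRep]
  | some m =>
    have hm : PySem.List.min? (L.filter (fun line => decide (shift line ≤ 0))) (fun x => -shift x) = some m := by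
      rw [pv_min_linf shift L, h]
    have hne : L.filter (fun line => decide (shift line ≤ 0)) ≠ [] := by
      intro he; rw [he] at hm; simp [PySem.List.min?] at hm
    rw [if_pos (by simpa [List.length_eq_zero_iff] using hne), hm]
    simp [pvRep]

theorem pv_aboveA (shift : List (Int × Int) → Int) (L : List (List (Int × Int))) :
    (if (L.filter (fun line => decide (0 ≤ shift line))).length ≠ 0 then
        (PySem.List.min? (L.filter (fun line => decide (0 ≤ shift line))) (fun x => shift x)).getD []
      else [])
      = (pvRep shift (L.foldl (pvGA shift) none)).1 := by
  cases h : L.foldl (pvGA shift) none with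
  | none =>
    have he : L.filter (fun line => decide (0 ≤ shift line)) = [] :=
      (PySem.List.min?_eq_none_iff _ _).mp (by rw [pv_min_lsup shift L, h])
    simp [he, pvRep]
  | some m =>
    have hm : PySem.List.min? (L.filter (fun line => decide (0 ≤ shift line))) (fun x => shift x) = some m := by
      rw [pv_min_lsup shift L, h]
    have hne : L.filter (fun line => decide (0 ≤ shift line)) ≠ [] := by
      intro he; rw [he] at hm; simp [PySem.List.min?] at hm
    rw [if_pos (by simpa [List.length_eq_zero_iff] using hne), hm]
    simp [pvRep]

-- one input list, one shift function: A's filter+min pair equals B's one-pass fold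
theorem pv_core (shift : List (Int × Int) → Int) (L : List (List (Int × Int))) :
    ((if (L.filter (fun line => decide (shift line ≤ 0))).length ≠ 0 then
        (PySem.List.min? (L.filter (fun line => decide (shift line ≤ 0))) (fun x => -shift x)).getD []
      else []),
     (if (L.filter (fun line => decide (0 ≤ shift line))).length ≠ 0 then
        (PySem.List.min? (L.filter (fun line => decide (0 ≤ shift line))) (fun x => shift x)).getD []
      else []))
    = ((L.foldl (fun st line => (pvBelowStep st.1 line (shift line), pvAboveStep st.2 line (shift line)))
          (([], none), ([], none))).1.1,
       (L.foldl (fun st line => (pvBelowStep st.1 line (shift line), pvAboveStep st.2 line (shift line)))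
          (([], none), ([], none))).2.1) := by
  rw [pv_foldl_pair2 shift L ([], none) ([], none)]
  rw [show (([], none) : (List (Int × Int)) × Option Int) = pvRep shift none from rfl]
  rw [pv_foldl_stepB shift L none, pv_foldl_stepA shift L none]
  rw [pv_belowA shift L, pv_aboveA shift L]

-- ===== VERDICT (by name: the statement is the Claim_ definition above) =====
theorem get_frame_lines_spec : Claim_equal_get_frame_lines := by
  intro position lines mode var_match _ _
  unfold Spec_get_frame_lines
  exact pv_core
    (fun x => pvPairGet ((PySem.List.pyGet? x 0).getD (0, 0)) (if mode = "vertical" then 0 else 1)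
      - (PySem.List.pyGet? (PySem.List.slice position (some 0) (some 2))
          (((if mode = "vertical" then (0 : Nat) else 1) : Nat) : Int)).getD 0)
    (if var_match then
        lines.filter (pvCross (if mode = "vertical" then 1 else 0)
          ((PySem.List.pyGet? (PySem.List.slice position (some 0) (some 2))
            (((if mode = "vertical" then (1 : Nat) else 0) : Nat) : Int)).getD 0))
      else lines)
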